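-- pv_equiv track=rewrite | github.com/DBO-DKFZ/expert_informed_histo_classification | src/utils/plots.py | _match_numbering
-- ===== SOURCE A (Python) =====
-- from typing import Optional
--
-- def _match_numbering(numbering: Optional[str], length: int) -> list[str]:
--     """
--     Returns a sequence depending on the numbering chosen. Creates an array of length `length`, filled with values
--     depending on the numbering system chosen. When the length exceeds 26, "arabic" is used as a fallback option
--     (if a valid numbering is chosen, otherwise returns a list of empty strings).
-- ,
--     :param numbering: supported are alphabetical (a,b,c,...), Alphabetical (A,B,C,...), arabic (1,2,3,...),
--                       roman (i, ii, iii, ...), and Roman (I, II, III, ...). If anything else is passed, returns a list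
--                       of empty strings.
--     :param length: the size of the sequence.
--     :return: a list indices.
--     """
--     roman_numerals = ['i', 'ii', 'iii', 'iv', 'v', 'vi', 'vii', 'viii', 'ix', 'x', 'xi', 'xii', 'xiii', 'xiv', 'xv',
--                       'xvi', 'xvii', 'xviii', 'xix', 'xx', 'xxi', 'xxii', 'xxiii', 'xxiv', 'xxv', 'xxvi']
--     roman_numerals_upper = [r.upper() for r in roman_numerals]
--
--     match numbering:
--         case 'alphabetical' if length <= 26:
--             index = [chr(ord('a') + x) for x in range(length)]
--         case 'Alphabetical' if length <= 26:
--             index = [chr(ord('A') + x) for x in range(length)]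
--         case 'roman' if length <= 26:
--             index = roman_numerals[:length]
--         case 'Roman' if length <= 26:
--             index = roman_numerals_upper[:length]
--         case 'arabic' | 'alphabetical' | 'Alphabetical' | 'roman' | 'Roman':
--             index = [str(x + 1) for x in range(length)]
--         case _:
--             index = ["" for _ in range(length)]
--
--     return index
-- ===== SOURCE B (Python) =====
-- def _roman_lower(n):
--     s = ''
--     for v, sym in ((10, 'x'), (9, 'ix'), (5, 'v'), (4, 'iv'), (1, 'i')):
--         while n >= v:
--             s += sym
--             n -= v
--     return s
--
--
-- def _match_numbering(numbering, length):
--     if numbering not in ('alphabetical', 'Alphabetical', 'roman', 'Roman', 'arabic'):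
--         fmt = lambda i: ''
--     elif numbering == 'arabic' or length > 26:
--         fmt = lambda i: str(i + 1)
--     elif numbering == 'alphabetical':
--         fmt = lambda i: chr(ord('a') + i)
--     elif numbering == 'Alphabetical':
--         fmt = lambda i: chr(ord('A') + i)
--     elif numbering == 'roman':
--         fmt = lambda i: _roman_lower(i + 1)
--     else:  # 'Roman'
--         fmt = lambda i: _roman_lower(i + 1).upper()
--     return [fmt(i) for i in range(length)]
-- ===== Notes on version B (the rewrite author's own statement) =====
-- stated objective: simpler
-- what changed: Collapses the six list-building match arms into one chosen element-formatter applied in a single comprehension over range(length), and generates roman numerals algorithmically (greedy subtractive pairs) instead of a 26-entry literal table.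
-- intended difference: For numbering 'roman'/'Roman' with -25 <= length <= -1, A's roman_numerals[:length] wraps the negative length and returns the first 26+length numerals, while B returns the empty list, which is the intended value for a non-positive length (every other numbering yields [] there). — e.g. on _match_numbering(some "roman", -1): A returns ["i", "ii", "iii", "iv", "v", "vi", "vii", "viii", "ix", "x", "xi", "xii", "xiii", "xiv", "xv", "xvi", "xvii", "xviii",…, B returns []
import Mathlib
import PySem

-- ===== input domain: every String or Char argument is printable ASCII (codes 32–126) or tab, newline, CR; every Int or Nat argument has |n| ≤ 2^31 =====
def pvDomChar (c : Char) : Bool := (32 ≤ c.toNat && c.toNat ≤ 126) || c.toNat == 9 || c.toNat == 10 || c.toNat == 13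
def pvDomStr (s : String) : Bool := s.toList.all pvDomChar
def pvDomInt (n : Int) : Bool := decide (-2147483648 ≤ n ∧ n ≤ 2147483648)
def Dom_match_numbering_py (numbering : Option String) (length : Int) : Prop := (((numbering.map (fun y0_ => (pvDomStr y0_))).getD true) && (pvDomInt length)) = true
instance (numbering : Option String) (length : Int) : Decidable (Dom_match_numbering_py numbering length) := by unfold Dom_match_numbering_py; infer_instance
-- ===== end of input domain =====

-- B collapses A's six match arms into one element-formatter applied in a single
-- comprehension, and generates the roman numerals greedily instead of a literal table
-- (objective: simpler; B intentionally returns [] where A slices with a negative length, see D_).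

-- ===== PORT A =====
-- chr(ord('a') + x) is ported by hand as Char.ofNat (exact: the code point is 97..122 here)
def match_numbering_py (numbering : Option String) (length : Int) : List String :=
  let romanNumerals : List String := ["i", "ii", "iii", "iv", "v", "vi", "vii", "viii", "ix", "x",
    "xi", "xii", "xiii", "xiv", "xv", "xvi", "xvii", "xviii", "xix", "xx",
    "xxi", "xxii", "xxiii", "xxiv", "xxv", "xxvi"]
  let romanNumeralsUpper : List String := romanNumerals.map (fun r => PySem.Str.upper r)
  if numbering = some "alphabetical" ∧ length ≤ 26 then
    (PySem.List.pyRange 0 length 1).map (fun x => String.mk [Char.ofNat (97 + x).toNat])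
  else if numbering = some "Alphabetical" ∧ length ≤ 26 then
    (PySem.List.pyRange 0 length 1).map (fun x => String.mk [Char.ofNat (65 + x).toNat])
  else if numbering = some "roman" ∧ length ≤ 26 then
    PySem.List.slice romanNumerals none (some length)
  else if numbering = some "Roman" ∧ length ≤ 26 then
    PySem.List.slice romanNumeralsUpper none (some length)
  else if numbering = some "arabic" ∨ numbering = some "alphabetical" ∨
      numbering = some "Alphabetical" ∨ numbering = some "roman" ∨ numbering = some "Roman" then
    (PySem.List.pyRange 0 length 1).map (fun x => PySem.Int.toStr (x + 1))
  else
    (PySem.List.pyRange 0 length 1).map (fun _ => "")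

-- ===== PORT B =====
-- the while loop of _roman_lower, with a fuel bound (n.toNat suffices since each v ≥ 1 here)
def romanWhile (fuel : Nat) (v : Int) (sym : String) (s : String) (n : Int) : String × Int :=
  match fuel with
  | 0 => (s, n)
  | fuel + 1 => if v ≤ n then romanWhile fuel v sym (s ++ sym) (n - v) else (s, n)

def romanLower (n : Int) : String :=
  let pairs : List (Int × String) := [(10, "x"), (9, "ix"), (5, "v"), (4, "iv"), (1, "i")]
  (pairs.foldl (fun (acc : String × Int) p => romanWhile acc.2.toNat p.1 p.2 acc.1 acc.2) ("", n)).1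

def match_numbering_py_alt (numbering : Option String) (length : Int) : List String :=
  let fmt : Int → String :=
    if ¬ (numbering = some "alphabetical" ∨ numbering = some "Alphabetical" ∨
        numbering = some "roman" ∨ numbering = some "Roman" ∨ numbering = some "arabic") then
      fun _ => ""
    else if numbering = some "arabic" ∨ 26 < length then
      fun i => PySem.Int.toStr (i + 1)
    else if numbering = some "alphabetical" then
      fun i => String.mk [Char.ofNat (97 + i).toNat]
    else if numbering = some "Alphabetical" then
      fun i => String.mk [Char.ofNat (65 + i).toNat]
    else if numbering = some "roman" then
      fun i => romanLower (i + 1)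
    else
      fun i => PySem.Str.upper (romanLower (i + 1))
  (PySem.List.pyRange 0 length 1).map fmt

-- ===== PRECONDITION & SPEC =====
-- For numbering 'roman'/'Roman' with -25 ≤ length ≤ -1, A's roman_numerals[:length] wraps the
-- negative length and returns the first 26+length numerals, while B returns the empty list,
-- the intended value for a non-positive length (every other numbering yields [] there).
def D_match_numbering_py (numbering : Option String) (length : Int) : Prop :=
  match numbering with
  | none => False
  | some s => (s = "roman" ∨ s = "Roman") ∧ -25 ≤ length ∧ length ≤ -1
instance (numbering : Option String) (length : Int) : Decidable (D_match_numbering_py numbering length) := by unfold D_match_numbering_py; cases numbering <;> infer_instance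

def Spec_match_numbering_py (numbering : Option String) (length : Int) (out : List String) : Prop := ¬ D_match_numbering_py numbering length → out = match_numbering_py_alt numbering length
instance (numbering : Option String) (length : Int) (out : List String) : Decidable (Spec_match_numbering_py numbering length out) := by unfold Spec_match_numbering_py; infer_instance

def pvDiffWitness_match_numbering_py : Option String × Int := (some "roman", -1)
def pvDiffWitnessOut_match_numbering_py : (List String) × (List String) :=
  (["i", "ii", "iii", "iv", "v", "vi", "vii", "viii", "ix", "x",
    "xi", "xii", "xiii", "xiv", "xv", "xvi", "xvii", "xviii", "xix", "xx",
    "xxi", "xxii", "xxiii", "xxiv", "xxv"], [])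

-- ===== CLAIM (what is proved, stated in full; the proofs are below) =====
def Claim_unchanged_match_numbering_py : Prop := ∀ (numbering : Option String) (length : Int), Dom_match_numbering_py numbering length → Spec_match_numbering_py numbering length (match_numbering_py numbering length)
def Claim_changed_match_numbering_py : Prop := Dom_match_numbering_py (pvDiffWitness_match_numbering_py.1) (pvDiffWitness_match_numbering_py.2) ∧ D_match_numbering_py (pvDiffWitness_match_numbering_py.1) (pvDiffWitness_match_numbering_py.2) ∧ match_numbering_py (pvDiffWitness_match_numbering_py.1) (pvDiffWitness_match_numbering_py.2) = pvDiffWitnessOut_match_numbering_py.1 ∧ match_numbering_py_alt (pvDiffWitness_match_numbering_py.1) (pvDiffWitness_match_numbering_py.2) = pvDiffWitnessOut_match_numbering_py.2 ∧ pvDiffWitnessOut_match_numbering_py.1 ≠ pvDiffWitnessOut_match_numbering_py.2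
def Claim_exact_match_numbering_py : Prop := ∀ (numbering : Option String) (length : Int), Dom_match_numbering_py numbering length → D_match_numbering_py numbering length → match_numbering_py numbering length ≠ match_numbering_py_alt numbering length

-- ===== LEMMAS AND PROOFS =====

theorem roman_slice_eq (length : Int) (h26 : length ≤ 26) (hD : length ≤ -26 ∨ 0 ≤ length) :
    PySem.List.slice (["i", "ii", "iii", "iv", "v", "vi", "vii", "viii", "ix", "x",
      "xi", "xii", "xiii", "xiv", "xv", "xvi", "xvii", "xviii", "xix", "xx",
      "xxi", "xxii", "xxiii", "xxiv", "xxv", "xxvi"] : List String) none (some length) =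
    (PySem.List.pyRange 0 length 1).map (fun i => romanLower (i + 1)) := by
  rcases hD with hneg | hpos
  · obtain ⟨k, hk⟩ : ∃ k : Nat, length = -(k : Int) := ⟨(-length).toNat, by omega⟩
    subst hk
    rw [PySem.List.slice_to_neg_natCast _ k (by omega), PySem.List.pyRange_one_eq_nil (by omega)]
    simp [show (26 : Nat) - k = 0 by omega]
  · obtain ⟨k, hk⟩ : ∃ k : Nat, length = (k : Int) := ⟨length.toNat, by omega⟩
    subst hk
    have hk26 : k ≤ 26 := by omega
    interval_cases k <;> decide

theorem roman_upper_slice_eq (length : Int) (h26 : length ≤ 26) (hD : length ≤ -26 ∨ 0 ≤ length) :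
    PySem.List.slice ((["i", "ii", "iii", "iv", "v", "vi", "vii", "viii", "ix", "x",
      "xi", "xii", "xiii", "xiv", "xv", "xvi", "xvii", "xviii", "xix", "xx",
      "xxi", "xxii", "xxiii", "xxiv", "xxv", "xxvi"] : List String).map (fun r => PySem.Str.upper r))
      none (some length) =
    (PySem.List.pyRange 0 length 1).map (fun i => PySem.Str.upper (romanLower (i + 1))) := by
  rcases hD with hneg | hpos
  · obtain ⟨k, hk⟩ : ∃ k : Nat, length = -(k : Int) := ⟨(-length).toNat, by omega⟩
    subst hk
    rw [PySem.List.slice_to_neg_natCast _ k (by omega), PySem.List.pyRange_one_eq_nil (by omega)]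
    simp [show (26 : Nat) - k = 0 by omega]
  · obtain ⟨k, hk⟩ : ∃ k : Nat, length = (k : Int) := ⟨length.toNat, by omega⟩
    subst hk
    have hk26 : k ≤ 26 := by omega
    interval_cases k <;> decide

theorem unchanged_core (numbering : Option String) (length : Int)
    (hD : ¬ D_match_numbering_py numbering length) :
    match_numbering_py numbering length = match_numbering_py_alt numbering length := by
  unfold match_numbering_py match_numbering_py_alt
  by_cases h1 : numbering = some "alphabetical"
  · subst h1
    by_cases hl : length ≤ 26
    · simp [hl, show ¬ (26 : Int) < length by omega]
    · simp [hl, show (26 : Int) < length by omega]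
  by_cases h2 : numbering = some "Alphabetical"
  · subst h2
    by_cases hl : length ≤ 26
    · simp [hl, show ¬ (26 : Int) < length by omega]
    · simp [hl, show (26 : Int) < length by omega]
  by_cases h3 : numbering = some "roman"
  · subst h3
    have hr : length ≤ -26 ∨ 0 ≤ length ∨ 26 < length := by
      by_contra hc
      exact hD ⟨Or.inl rfl, by omega, by omega⟩
    by_cases hl : length ≤ 26
    · simp [hl, show ¬ (26 : Int) < length by omega]
      exact roman_slice_eq length hl (by omega)
    · simp [hl, show (26 : Int) < length by omega]
  by_cases h4 : numbering = some "Roman"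
  · subst h4
    have hr : length ≤ -26 ∨ 0 ≤ length ∨ 26 < length := by
      by_contra hc
      exact hD ⟨Or.inr rfl, by omega, by omega⟩
    by_cases hl : length ≤ 26
    · simp [hl, show ¬ (26 : Int) < length by omega]
      exact roman_upper_slice_eq length hl (by omega)
    · simp [hl, show (26 : Int) < length by omega]
  by_cases h5 : numbering = some "arabic"
  · subst h5
    simp
  · simp [h1, h2, h3, h4, h5]

-- ===== VERDICT (by name: the statement is the Claim_ definition above) =====
theorem match_numbering_py_spec : Claim_unchanged_match_numbering_py := by
  intro numbering length _ hD
  exact unchanged_core numbering length hD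

theorem match_numbering_py_changed : Claim_changed_match_numbering_py := by
  unfold Claim_changed_match_numbering_py; decide

theorem match_numbering_py_tight : Claim_exact_match_numbering_py := by
  unfold Claim_exact_match_numbering_py
  intro numbering length _ hD
  cases numbering with
  | none => exact hD.elim
  | some s =>
    obtain ⟨hn, hlo, hhi⟩ := hD
    rcases hn with rfl | rfl <;> interval_cases length <;> decide
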